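-- pv_equiv track=rewrite | github.com/jkclark/Advent-of-Code-2022 | solution_05.py | get_stack_and_move_inputs
-- ===== SOURCE A (Python) =====
-- def get_stack_and_move_inputs(file_input):
--     # Strategy here is to parse through the entire input file once,
--     # separating the crate-describing lines from the move-describing lines.
--     # Then, we'll parse those two pieces of input separately.
--     FIRST_NON_CRATE_LINE_PREFIX = " 1 "
--     crate_input = []
--     move_input = []
--     crate_mode = True
--     for line in file_input:
--         if line == "\n":  # Skip the emtpy line between crates & moves
--             continue
--
--         if crate_mode:
--             if line.startswith(FIRST_NON_CRATE_LINE_PREFIX):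
--                 crate_mode = False
--                 continue
--
--             crate_input.append(line)
--         else:
--             move_input.append(line)
--
--     return crate_input, move_input
-- ===== SOURCE B (Python) =====
-- def get_stack_and_move_inputs(file_input):
--     lines = list(file_input)
--     idx = next((i for i, l in enumerate(lines) if l.startswith(" 1 ")), len(lines))
--     crate_input = [l for l in lines[:idx] if l != "\n"]
--     move_input = [l for l in lines[idx + 1:] if l != "\n"]
--     return crate_input, move_input
-- ===== Notes on version B (the rewrite author's own statement) =====
-- stated objective: simpler
-- what changed: Replaced the stateful crate_mode flag loop with a boundary search (first line starting with ' 1 ') followed by two filtered slices.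
import Mathlib
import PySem

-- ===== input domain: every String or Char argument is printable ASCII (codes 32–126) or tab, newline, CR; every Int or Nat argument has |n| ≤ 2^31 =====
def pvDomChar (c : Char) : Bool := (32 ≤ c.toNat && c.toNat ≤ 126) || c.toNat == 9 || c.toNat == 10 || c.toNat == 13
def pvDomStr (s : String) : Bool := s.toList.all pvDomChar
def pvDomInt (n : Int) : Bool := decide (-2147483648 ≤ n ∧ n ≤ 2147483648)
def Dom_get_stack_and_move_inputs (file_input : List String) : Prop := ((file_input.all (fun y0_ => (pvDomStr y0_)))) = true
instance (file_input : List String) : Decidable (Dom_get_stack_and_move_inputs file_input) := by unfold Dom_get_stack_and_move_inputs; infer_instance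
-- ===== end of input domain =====

-- B replaces A's stateful crate_mode flag loop with a boundary search (first line starting with " 1 ") followed by two filtered slices (objective: simpler).


-- ===== PORT A =====
def get_stack_and_move_inputs (file_input : List String) : List String × List String :=
  let st := file_input.foldl
    (fun (s : List String × List String × Bool) line =>
      if line = "\n" then s
      else if s.2.2 then
        if PySem.Str.startswith line " 1 " then (s.1, s.2.1, false)
        else (s.1 ++ [line], s.2.1, s.2.2)
      else (s.1, s.2.1 ++ [line], s.2.2))
    ([], [], true)
  (st.1, st.2.1)

-- ===== PORT B =====
def get_stack_and_move_inputs_alt (file_input : List String) : List String × List String :=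
  let lines := file_input
  let idx : Nat := (lines.findIdx? (fun l => PySem.Str.startswith l " 1 ")).getD lines.length
  let crate_input := (lines.take idx).filter (fun l => decide (l ≠ "\n"))
  let move_input := (lines.drop (idx + 1)).filter (fun l => decide (l ≠ "\n"))
  (crate_input, move_input)

-- ===== PRECONDITION & SPEC =====
def Spec_get_stack_and_move_inputs (file_input : List String) (out : List String × List String) : Prop := out = get_stack_and_move_inputs_alt file_input
instance (file_input : List String) (out : List String × List String) : Decidable (Spec_get_stack_and_move_inputs file_input out) := by unfold Spec_get_stack_and_move_inputs; infer_instance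

-- ===== CLAIM (what is proved, stated in full; the proofs are below) =====
def Claim_equal_get_stack_and_move_inputs : Prop := ∀ (file_input : List String), Dom_get_stack_and_move_inputs file_input → Spec_get_stack_and_move_inputs file_input (get_stack_and_move_inputs file_input)

-- ===== LEMMAS AND PROOFS =====

-- ===== VERDICT (by name: the statement is the Claim_ definition above) =====
-- The fold body of port A, with the boundary test abstracted as p (proof helper).
def pvStep (p : String → Bool) (s : List String × List String × Bool) (line : String) : List String × List String × Bool :=
  if line = "\n" then s
  else if s.2.2 then
    if p line then (s.1, s.2.1, false)
    else (s.1 ++ [line], s.2.1, s.2.2)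
  else (s.1, s.2.1 ++ [line], s.2.2)

theorem pvStep_nl (p : String → Bool) (s : List String × List String × Bool) :
    pvStep p s "\n" = s := by simp [pvStep]

theorem pvStep_true (p : String → Bool) (c m : List String) (x : String)
    (hx : x ≠ "\n") (hs : p x = true) :
    pvStep p (c, m, true) x = (c, m, false) := by simp [pvStep, hx, hs]

theorem pvStep_keep (p : String → Bool) (c m : List String) (x : String)
    (hx : x ≠ "\n") (hs : ¬ p x = true) :
    pvStep p (c, m, true) x = (c ++ [x], m, true) := by simp [pvStep, hx, hs]

theorem pvStep_false (p : String → Bool) (c m : List String) (x : String)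
    (hx : x ≠ "\n") :
    pvStep p (c, m, false) x = (c, m ++ [x], false) := by simp [pvStep, hx]

-- In move mode (flag false) the fold appends every non-newline line to the move accumulator.
theorem foldA_false (p : String → Bool) (xs : List String) (c m : List String) :
    xs.foldl (pvStep p) (c, m, false)
      = (c, m ++ xs.filter (fun l => decide (l ≠ "\n")), false) := by
  induction xs generalizing m with
  | nil => simp
  | cons x xs ih =>
    by_cases hx : x = "\n"
    · subst hx
      rw [List.foldl_cons, pvStep_nl, ih]
      simp
    · rw [List.foldl_cons, pvStep_false p c m x hx, ih]
      simp [hx]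

-- In crate mode the fold result is exactly B's boundary-search-and-slice description.
theorem foldA_true (p : String → Bool) (hp : p "\n" = false) (xs : List String) (c : List String) :
    xs.foldl (pvStep p) (c, [], true)
      = (c ++ (xs.take ((xs.findIdx? p).getD xs.length)).filter (fun l => decide (l ≠ "\n")),
         (xs.drop ((xs.findIdx? p).getD xs.length + 1)).filter (fun l => decide (l ≠ "\n")),
         (xs.findIdx? p).isNone) := by
  induction xs generalizing c with
  | nil => simp
  | cons x xs ih =>
    by_cases hs : p x = true
    · have hx : x ≠ "\n" := by intro h; rw [h, hp] at hs; exact Bool.false_ne_true hs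
      rw [List.foldl_cons, pvStep_true p c [] x hx hs, foldA_false]
      simp [List.findIdx?_cons, hs]
    · have hfind : (x :: xs).findIdx? p
          = ((xs.findIdx? p).map (· + 1)) := by
        simp [List.findIdx?_cons, Bool.eq_false_iff.mpr hs]
      by_cases hx : x = "\n"
      · subst hx
        rw [List.foldl_cons, pvStep_nl, ih c, hfind]
        cases h : xs.findIdx? p <;> simp
      · rw [List.foldl_cons, pvStep_keep p c [] x hx hs, ih (c ++ [x]), hfind]
        cases h : xs.findIdx? p <;> simp [hx]

theorem get_stack_and_move_inputs_spec : Claim_equal_get_stack_and_move_inputs := by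
  intro file_input _
  unfold Spec_get_stack_and_move_inputs get_stack_and_move_inputs get_stack_and_move_inputs_alt
  have hstep : (fun (s : List String × List String × Bool) (line : String) =>
      if line = "\n" then s
      else if s.2.2 then
        if PySem.Str.startswith line " 1 " then (s.1, s.2.1, false)
        else (s.1 ++ [line], s.2.1, s.2.2)
      else (s.1, s.2.1 ++ [line], s.2.2))
      = pvStep (fun l => PySem.Str.startswith l " 1 ") := rfl
  have hp : (fun l => PySem.Str.startswith l " 1 ") "\n" = false := by decide
  rw [hstep, foldA_true (fun l => PySem.Str.startswith l " 1 ") hp file_input []]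
  simp
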